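-- pv_equiv track=rewrite | github.com/mattv8/ragtime | docker/scripts/fix_inline_imports.py | remove_spans
-- ===== SOURCE A (Python) =====
-- from typing import List, Sequence, Tuple
--
-- def remove_spans(lines: Sequence[str], spans: Sequence[Tuple[int, int]]) -> list[str]:
--     # spans are 0-based start, 1-based end logic from ast line numbers conversion
--     # AST lineno is 1-based. Our tuples are (start-1, end).
--     keep = [True] * len(lines)
--     for start, end in spans:
--         # Remove the import lines
--         for i in range(start, end):
--             if i < len(keep):
--                 keep[i] = False
--
--         # Aggressively remove ONE trailing blank line if it exists.
--         # This fixes the "gap" left when an import that was separated from code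
--         # by a blank line is removed.
--         if end < len(lines) and lines[end].strip() == "":
--             keep[end] = False
--
--     return [line for i, line in enumerate(lines) if keep[i]]
-- ===== SOURCE B (Python) =====
-- def remove_spans(lines, spans):
--     # Difference array over line indices: +1/-1 at span boundaries, then one
--     # prefix sweep computes the coverage count; a line is kept iff count == 0.
--     # (Structurally different from the per-index marking approach.)
--     n = len(lines)
--     diff = [0] * (n + 1)
--     for start, end in spans:
--         lo = start
--         hi = min(end, n)
--         if lo < hi:
--             diff[lo] += 1
--             diff[hi] -= 1
--         if end < n and lines[end].strip() == "":
--             diff[end] += 1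
--             diff[end + 1] -= 1
--     out = []
--     cover = 0
--     for i, line in enumerate(lines):
--         cover += diff[i]
--         if cover == 0:
--             out.append(line)
--     return out
-- ===== Notes on version B (the rewrite author's own statement) =====
-- stated objective: alternative
-- what changed: Instead of marking every index of every span False in a boolean mask, B records +1/-1 at span boundaries in a difference array and one prefix sweep over the lines computes the coverage count, keeping lines with count 0.
-- outside the precondition, e.g. on remove_spans(['a', 'b'], [(-1, 0)]): A returns ['a'], B returns []; on remove_spans([], [(-1, 0)]): A raises IndexError, B returns []
import Mathlib
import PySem

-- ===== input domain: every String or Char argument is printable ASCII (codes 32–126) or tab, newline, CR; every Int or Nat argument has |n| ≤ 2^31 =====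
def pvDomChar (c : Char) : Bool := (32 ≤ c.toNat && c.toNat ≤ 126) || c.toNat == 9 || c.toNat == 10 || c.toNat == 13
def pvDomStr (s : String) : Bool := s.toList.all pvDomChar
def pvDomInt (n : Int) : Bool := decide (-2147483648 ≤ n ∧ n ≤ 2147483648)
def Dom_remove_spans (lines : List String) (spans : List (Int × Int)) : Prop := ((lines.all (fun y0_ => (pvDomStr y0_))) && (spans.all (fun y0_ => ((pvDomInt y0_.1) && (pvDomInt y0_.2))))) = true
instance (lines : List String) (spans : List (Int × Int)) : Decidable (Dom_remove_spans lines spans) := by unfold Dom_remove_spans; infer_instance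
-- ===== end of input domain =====

-- B replaces A's per-index span marking with a boundary difference array and one
-- prefix sweep computing the coverage count; equivalence proved on Pre_.

-- ===== PORT A =====
-- lines[end].strip() == ""  (evaluated only where 0 ≤ end < len(lines); getD "" is unreachable there)
def pvBlankAt (lines : List String) (e : Int) : Bool :=
  PySem.Str.strip ((PySem.List.pyGet? lines e).getD "") == ""

-- body of 'for i in range(start, end): if i < len(keep): keep[i] = False'
def pvStepRange (k : List Bool) (i : Int) : List Bool :=
  if i < (k.length : Int) then PySem.List.pySetD k i false else k

-- one iteration of A's 'for start, end in spans' loop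
def pvStepSpanA (lines : List String) (keep : List Bool) (se : Int × Int) : List Bool :=
  let keep := (PySem.List.pyRange se.1 se.2 1).foldl pvStepRange keep
  if decide (se.2 < (lines.length : Int)) && pvBlankAt lines se.2 then
    PySem.List.pySetD keep se.2 false
  else keep

def remove_spans (lines : List String) (spans : List (Int × Int)) : List String :=
  let keep : List Bool := List.replicate lines.length true
  let keep := spans.foldl (pvStepSpanA lines) keep
  (PySem.List.enumerate lines 0).foldl
    (fun out p => if ((PySem.List.pyGet? keep p.1).getD false) then out ++ [p.2] else out) []

-- ===== PORT B =====
-- diff[i] += v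
def pvBump (d : List Int) (i v : Int) : List Int :=
  PySem.List.pySetD d i (PySem.List.pyGetD d i 0 + v)

-- one iteration of B's 'for start, end in spans' loop
def pvStepSpanB (lines : List String) (d : List Int) (se : Int × Int) : List Int :=
  let n : Int := (lines.length : Int)
  let d := if se.1 < min se.2 n then pvBump (pvBump d se.1 1) (min se.2 n) (-1) else d
  if decide (se.2 < n) && pvBlankAt lines se.2 then pvBump (pvBump d se.2 1) (se.2 + 1) (-1) else d

def remove_spans_alt (lines : List String) (spans : List (Int × Int)) : List String :=
  let diff := spans.foldl (pvStepSpanB lines) (List.replicate (lines.length + 1) 0)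
  ((PySem.List.enumerate lines 0).foldl
    (fun s p =>
      let cover := s.2 + PySem.List.pyGetD diff p.1 0
      (if cover = 0 then s.1 ++ [p.2] else s.1, cover))
    (([] : List String), (0 : Int))).1

-- ===== PRECONDITION & SPEC =====
-- Pre_ restricts to the function's natural domain of non-negative (start, end) spans
-- (AST line numbers): a negative span component makes A raise IndexError or silently
-- remove lines from the END via Python's negative-index wraparound.
def Pre_remove_spans (lines : List String) (spans : List (Int × Int)) : Prop :=
  ∀ se ∈ spans, 0 ≤ se.1 ∧ 0 ≤ se.2
instance (lines : List String) (spans : List (Int × Int)) : Decidable (Pre_remove_spans lines spans) := by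
  unfold Pre_remove_spans; infer_instance

def pvWitness_remove_spans : List String × (List (Int × Int)) :=
  (["import os", "", "x = 1"], [(0, 1)])

def Spec_remove_spans (lines : List String) (spans : List (Int × Int)) (out : List String) : Prop := out = remove_spans_alt lines spans
instance (lines : List String) (spans : List (Int × Int)) (out : List String) : Decidable (Spec_remove_spans lines spans out) := by unfold Spec_remove_spans; infer_instance

-- ===== CLAIM (what is proved, stated in full; the proofs are below) =====
def Claim_equal_remove_spans : Prop := ∀ (lines : List String) (spans : List (Int × Int)), Dom_remove_spans lines spans → Pre_remove_spans lines spans → Spec_remove_spans lines spans (remove_spans lines spans)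

-- ===== LEMMAS AND PROOFS =====

-- a span (or its blank-line rider) covers line index i
def pvCov (lines : List String) (se : Int × Int) (i : Nat) : Bool :=
  (decide (se.1 ≤ (i : Int)) && decide ((i : Int) < se.2) && decide (i < lines.length))
  || (decide ((i : Int) = se.2) && decide (se.2 < (lines.length : Int)) && pvBlankAt lines se.2)

-- prefix sum of the first j cells of the difference array
def pvS (d : List Int) (j : Nat) : Int := ((List.range j).map (fun t => d.getD t 0)).sum

-- B's sweep loop as a structural recursion threading the running cover
def pvSelect (d : List Int) : List String → Nat → Int → List String
  | [], _, _ => []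
  | x :: xs, s, c =>
    let c' := c + d.getD s 0
    (if c' = 0 then [x] else []) ++ pvSelect d xs (s + 1) c'

theorem length_foldl_stepRange (l : List Int) : ∀ (k : List Bool),
    (l.foldl pvStepRange k).length = k.length := by
  induction l with
  | nil => intro k; rfl
  | cons a l ih =>
    intro k
    simp only [List.foldl_cons, ih]
    unfold pvStepRange
    split <;> simp [PySem.List.length_pySetD]
theorem getElem?_foldl_stepRange (e : Int) : ∀ (s : Int), 0 ≤ s →
    ∀ (keep : List Bool) (i : Nat),
      ((PySem.List.pyRange s e 1).foldl pvStepRange keep)[i]? =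
        if s ≤ (i : Int) ∧ (i : Int) < e ∧ i < keep.length then some false else keep[i]? := by
  intro s
  by_cases hle : e ≤ s
  · intro hs keep i
    rw [PySem.List.pyRange_one_eq_nil hle]
    simp only [List.foldl_nil]
    rw [if_neg (by omega)]
  · have hlt : s < e := by omega
    have : ((e - s).toNat) = (e - (s+1)).toNat + 1 := by omega
    intro hs keep i
    rw [PySem.List.pyRange_one_cons hlt]
    simp only [List.foldl_cons]
    rw [getElem?_foldl_stepRange e (s+1) (by omega)]
    unfold pvStepRange
    by_cases hk : s < (keep.length : Int)
    · rw [if_pos hk, PySem.List.pySetD_of_nonneg keep false hs]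
      by_cases hi : (i : Int) = s
      · have : i = s.toNat := by omega
        subst this
        rw [if_neg (by omega)]
        have hkl : s.toNat < keep.length := by omega
        rw [if_pos ⟨by omega, by omega, hkl⟩]
        simp [List.getElem?_set_self hkl]
      · simp only [List.length_set]
        rw [List.getElem?_set_ne (by omega)]
        by_cases hc : s + 1 ≤ (i:Int) ∧ (i:Int) < e ∧ i < keep.length
        · rw [if_pos hc, if_pos ⟨by omega, hc.2⟩]
        · rw [if_neg hc, if_neg (by omega)]
    · rw [if_neg hk]
      by_cases hc : s + 1 ≤ (i:Int) ∧ (i:Int) < e ∧ i < keep.length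
      · rw [if_pos hc, if_pos ⟨by omega, hc.2⟩]
      · rw [if_neg hc, if_neg (by intro h; exact hc ⟨by omega, h.2.1, h.2.2⟩)]
        -- need: ¬(s ≤ i ∧ i < e ∧ i < len) given ¬hc and ¬(s<len): if s ≤ i... hmm i≥s, i<len→ s<len contradiction? no: s ≤ i < len means s < len. ✓
termination_by s => (e - s).toNat
decreasing_by omega

theorem length_stepA (lines : List String) (keep : List Bool) (se : Int × Int) :
    (pvStepSpanA lines keep se).length = keep.length := by
  unfold pvStepSpanA
  split <;> simp [PySem.List.length_pySetD, length_foldl_stepRange]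
theorem getElem?_stepA (lines : List String) (keep : List Bool) (se : Int × Int)
    (h1 : 0 ≤ se.1) (h2 : 0 ≤ se.2) (hlen : keep.length = lines.length) (i : Nat) :
    (pvStepSpanA lines keep se)[i]? =
      if pvCov lines se i then some false else keep[i]? := by
  unfold pvStepSpanA
  simp only []
  have hr := getElem?_foldl_stepRange se.2 se.1 h1 keep i
  have hlr := length_foldl_stepRange (PySem.List.pyRange se.1 se.2 1) keep
  by_cases hb : (decide (se.2 < (lines.length : Int)) && pvBlankAt lines se.2) = true
  · rw [if_pos hb]
    simp only [Bool.and_eq_true, decide_eq_true_eq] at hb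
    rw [PySem.List.pySetD_of_nonneg _ false h2]
    by_cases hi : (i : Int) = se.2
    · have : i = se.2.toNat := by omega
      subst this
      rw [List.getElem?_set_self (by omega)]
      rw [if_pos]
      unfold pvCov
      simp only [Bool.or_eq_true, Bool.and_eq_true, decide_eq_true_eq]
      exact Or.inr ⟨⟨by omega, hb.1⟩, hb.2⟩
    · rw [List.getElem?_set_ne (by omega), hr]
      unfold pvCov
      simp only [Bool.or_eq_true, Bool.and_eq_true, decide_eq_true_eq]
      by_cases hc : se.1 ≤ (i:Int) ∧ (i:Int) < se.2 ∧ i < keep.length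
      · rw [if_pos hc, if_pos (Or.inl ⟨⟨hc.1, hc.2.1⟩, by omega⟩)]
      · rw [if_neg hc, if_neg]
        intro h
        rcases h with h | h
        · exact hc ⟨h.1.1, h.1.2, by omega⟩
        · exact hi h.1.1
  · rw [if_neg hb, hr]
    simp only [Bool.and_eq_true, decide_eq_true_eq] at hb
    unfold pvCov
    simp only [Bool.or_eq_true, Bool.and_eq_true, decide_eq_true_eq]
    by_cases hc : se.1 ≤ (i:Int) ∧ (i:Int) < se.2 ∧ i < keep.length
    · rw [if_pos hc, if_pos (Or.inl ⟨⟨hc.1, hc.2.1⟩, by omega⟩)]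
    · rw [if_neg hc, if_neg]
      intro h
      rcases h with h | h
      · exact hc ⟨h.1.1, h.1.2, by omega⟩
      · exact hb ⟨h.1.2, h.2⟩
theorem getElem?_foldl_stepA (lines : List String) (spans : List (Int × Int))
    (hp : ∀ se ∈ spans, 0 ≤ se.1 ∧ 0 ≤ se.2) :
    ∀ (keep : List Bool), keep.length = lines.length → ∀ (i : Nat),
      (spans.foldl (pvStepSpanA lines) keep)[i]? =
        if spans.any (fun se => pvCov lines se i) then some false else keep[i]? := by
  induction spans with
  | nil => intro keep hl i; simp
  | cons se spans ih =>
    intro keep hl i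
    simp only [List.foldl_cons]
    rw [ih (fun x hx => hp x (List.mem_cons_of_mem _ hx)) _
        (by rw [length_stepA, hl]) i]
    rw [getElem?_stepA lines keep se (hp se (List.mem_cons_self)).1 (hp se (List.mem_cons_self)).2 hl i]
    simp only [List.any_cons, Bool.or_eq_true]
    by_cases h1 : (spans.any (fun se => pvCov lines se i)) = true
    · rw [if_pos h1, if_pos (Or.inr h1)]
    · rw [if_neg h1]
      by_cases h2 : pvCov lines se i = true
      · rw [if_pos h2, if_pos (Or.inl h2)]
      · rw [if_neg h2, if_neg (by simp [h1, h2])]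

theorem length_bump (d : List Int) (i v : Int) : (pvBump d i v).length = d.length := by
  unfold pvBump; simp [PySem.List.length_pySetD]

theorem length_stepB (lines : List String) (d : List Int) (se : Int × Int) :
    (pvStepSpanB lines d se).length = d.length := by
  unfold pvStepSpanB
  simp only []
  split <;> split <;> simp [length_bump]

theorem pvS_bump (d : List Int) (i : Int) (hi : 0 ≤ i) (v : Int) (m : Nat) :
    pvS (pvBump d i v) m = pvS d m + (if i < (m : Int) ∧ i < (d.length : Int) then v else 0) := by
  unfold pvBump pvS
  rw [PySem.List.pySetD_of_nonneg _ _ hi]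
  by_cases hin : i < (m : Int) ∧ i < (d.length : Int)
  · rw [if_pos hin]
    have hil : i.toNat < d.length := by omega
    have him : i.toNat < m := by omega
    have hget : PySem.List.pyGetD d i 0 = d.getD i.toNat 0 := by
      have := PySem.List.pyGetD_natCast d i.toNat 0
      rw [show ((i.toNat : Nat) : Int) = i by omega] at this
      exact this
    have hmem : ∀ t ∈ List.range m, (d.set i.toNat (PySem.List.pyGetD d i 0 + v)).getD t 0
        = d.getD t 0 + (if t = i.toNat then v else 0) := by
      intro t ht
      by_cases hti : t = i.toNat
      · subst hti
        simp [List.getD, List.getElem?_set_self hil, hget, List.getD]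
      · simp [List.getD, List.getElem?_set_ne (by omega : i.toNat ≠ t), hti]
    rw [List.map_congr_left hmem]
    have : (((List.range m).map (fun t => d.getD t 0 + if t = i.toNat then v else 0)).sum : Int)
        = (∑ t ∈ Finset.range m, (d.getD t 0 + if t = i.toNat then v else 0)) := rfl
    rw [this, Finset.sum_add_distrib,
        Finset.sum_ite_eq' (Finset.range m) i.toNat (fun _ => v)]
    simp [him]
    rfl
  · rw [if_neg hin]
    have : ∀ t ∈ List.range m, (d.set i.toNat (PySem.List.pyGetD d i 0 + v)).getD t 0 = d.getD t 0 := by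
      intro t ht
      simp only [List.mem_range] at ht
      by_cases hti : t = i.toNat
      · subst hti
        have : d.length ≤ i.toNat ∨ m ≤ i.toNat := by omega
        rcases this with h | h
        · rw [List.set_eq_of_length_le h]
        · omega
      · simp [List.getD, List.getElem?_set_ne (by omega : i.toNat ≠ t)]
    rw [List.map_congr_left this]
    omega

theorem pvS_stepB (lines : List String) (d : List Int) (se : Int × Int)
    (h1 : 0 ≤ se.1) (h2 : 0 ≤ se.2) (hlen : d.length = lines.length + 1)
    (j : Nat) (hj : j < lines.length) :
    pvS (pvStepSpanB lines d se) (j + 1) =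
      pvS d (j + 1) + (if pvCov lines se j then 1 else 0) := by
  unfold pvStepSpanB pvCov
  simp only []
  cases hbl : pvBlankAt lines se.2 <;>
  by_cases hc1 : se.1 < min se.2 (lines.length : Int) <;>
  by_cases hc2 : se.2 < (lines.length : Int) <;>
  simp only [hbl, hc1, hc2, decide_true, decide_false, decide_eq_true_eq,
    Bool.and_true, Bool.and_false, Bool.true_and, Bool.false_and,
    Bool.or_false, Bool.false_or, Bool.or_true, Bool.and_self,
    Bool.false_eq_true, Bool.true_eq_false, Bool.and_eq_true, Bool.or_eq_true,
    if_true, if_false, ite_true, ite_false, eq_self_iff_true] <;>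
  first
  | (rw [pvS_bump _ (se.2+1) (by omega), pvS_bump _ se.2 (by omega),
         pvS_bump _ (min se.2 (lines.length : Int)) (by omega), pvS_bump _ se.1 (by omega)]
     simp only [length_bump, hlen]
     split_ifs <;> omega)
  | (rw [pvS_bump _ (min se.2 (lines.length : Int)) (by omega), pvS_bump _ se.1 (by omega)]
     simp only [length_bump, hlen]
     split_ifs <;> omega)
  | (rw [pvS_bump _ (se.2+1) (by omega), pvS_bump _ se.2 (by omega)]
     simp only [length_bump, hlen]
     split_ifs <;> omega)
  | (split_ifs <;> omega)

theorem pvS_foldl_stepB (lines : List String) (spans : List (Int × Int))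
    (hp : ∀ se ∈ spans, 0 ≤ se.1 ∧ 0 ≤ se.2) :
    ∀ (d : List Int), d.length = lines.length + 1 → ∀ (j : Nat), j < lines.length →
      pvS (spans.foldl (pvStepSpanB lines) d) (j + 1) =
        pvS d (j + 1) + (spans.countP (fun se => pvCov lines se j) : Int) := by
  induction spans with
  | nil => intro d hl j hj; simp
  | cons se spans ih =>
    intro d hl j hj
    simp only [List.foldl_cons]
    rw [ih (fun x hx => hp x (List.mem_cons_of_mem _ hx)) _ (by rw [length_stepB, hl]) j hj]
    rw [pvS_stepB lines d se (hp se List.mem_cons_self).1 (hp se List.mem_cons_self).2 hl j hj]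
    rw [List.countP_cons]
    by_cases h : pvCov lines se j = true <;> simp [h] <;> push_cast <;> ring

theorem pvS_succ (d : List Int) (j : Nat) : pvS d (j + 1) = pvS d j + d.getD j 0 := by
  unfold pvS; rw [List.range_succ]; simp

theorem pvS_replicate (n m : Nat) : pvS (List.replicate n (0 : Int)) m = 0 := by
  unfold pvS
  have h : ∀ t : Nat, (List.replicate n (0 : Int)).getD t 0 = 0 := by
    intro t; simp [List.getD, List.getElem?_replicate]; split <;> rfl
  simp only [h]
  simp

theorem sweep_eq_select (diff : List Int) :
    ∀ (l : List String) (s : Nat) (out : List String) (c : Int),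
      ((PySem.List.enumerate l (s : Int)).foldl
        (fun t p =>
          let cover := t.2 + PySem.List.pyGetD diff p.1 0
          (if cover = 0 then t.1 ++ [p.2] else t.1, cover)) (out, c)).1
      = out ++ pvSelect diff l s c := by
  intro l
  induction l with
  | nil => intro s out c; simp [pvSelect, PySem.List.enumerate_nil]
  | cons x xs ih =>
    intro s out c
    rw [PySem.List.enumerate_cons]
    simp only [List.foldl_cons, PySem.List.pyGetD_natCast]
    rw [show ((s : Int) + 1) = ((s + 1 : Nat) : Int) by push_cast; ring]
    rw [ih (s + 1)]
    have hstep : pvSelect diff (x :: xs) s c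
        = (if c + diff.getD s 0 = 0 then [x] else []) ++ pvSelect diff xs (s + 1) (c + diff.getD s 0) := rfl
    rw [hstep]
    by_cases h : c + diff.getD s 0 = 0 <;> simp only [List.getD] at h ⊢ <;> simp [h]

theorem select_spec (d : List Int) :
    ∀ (l : List String) (s : Nat),
      pvSelect d l s (pvS d s) =
        ((PySem.List.enumerate l (s : Int)).filter
          (fun p => decide (pvS d (p.1.toNat + 1) = 0))).map (·.2) := by
  intro l
  induction l with
  | nil => intro s; simp [pvSelect, PySem.List.enumerate_nil]
  | cons x xs ih =>
    intro s
    rw [PySem.List.enumerate_cons]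
    unfold pvSelect
    simp only []
    have hc : pvS d s + d.getD s 0 = pvS d (s + 1) := (pvS_succ d s).symm
    rw [hc]
    rw [show ((s : Int) + 1) = ((s + 1 : Nat) : Int) by push_cast; ring]
    rw [List.filter_cons]
    by_cases h : pvS d (s + 1) = 0
    · rw [if_pos h, if_pos (by simp [h])]
      simp only [List.map_cons, List.singleton_append]
      rw [ih (s + 1)]
    · rw [if_neg h, if_neg (by simp [h])]
      simp only [List.nil_append]
      rw [ih (s + 1)]

theorem sweep_eq_select_zero (diff : List Int) (l : List String) :
    ((PySem.List.enumerate l 0).foldl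
      (fun t p => (if t.2 + PySem.List.pyGetD diff p.1 0 = 0 then t.1 ++ [p.2] else t.1,
                   t.2 + PySem.List.pyGetD diff p.1 0)) (([] : List String), (0 : Int))).1
    = pvSelect diff l 0 0 := by
  have h := sweep_eq_select diff l 0 [] 0
  simpa using h

-- ===== VERDICT (by name: the statement is the Claim_ definition above) =====
theorem remove_spans_spec : Claim_equal_remove_spans := by
  intro lines spans _hdom hpre
  unfold Spec_remove_spans remove_spans remove_spans_alt
  simp only []
  -- A's output as a filter of the enumerated lines
  rw [PySem.List.foldl_append_if
    (fun (p : Int × String) => (PySem.List.pyGet? (spans.foldl (pvStepSpanA lines) (List.replicate lines.length true)) p.1).getD false)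
    (fun (p : Int × String) => p.2) (PySem.List.enumerate lines) []]
  -- B's sweep as pvSelect, then as a filter of the enumerated lines
  rw [sweep_eq_select_zero (spans.foldl (pvStepSpanB lines) (List.replicate (lines.length + 1) 0)) lines]
  rw [show pvSelect (spans.foldl (pvStepSpanB lines) (List.replicate (lines.length + 1) 0)) lines 0 0
      = pvSelect (spans.foldl (pvStepSpanB lines) (List.replicate (lines.length + 1) 0)) lines 0
          (pvS (spans.foldl (pvStepSpanB lines) (List.replicate (lines.length + 1) 0)) 0) from rfl]
  rw [select_spec]
  simp only [List.nil_append, Nat.cast_zero]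
  apply congrArg (List.map _)
  apply List.filter_congr
  intro p hp
  rw [PySem.List.mem_enumerate_iff] at hp
  obtain ⟨k, hk, rfl⟩ := hp
  simp only [zero_add]
  rw [PySem.List.pyGet?_natCast]
  rw [getElem?_foldl_stepA lines spans hpre _ (by simp) k]
  simp only [Int.toNat_natCast,
    pvS_foldl_stepB lines spans hpre (List.replicate (lines.length + 1) 0) (by simp) k hk,
    pvS_replicate, zero_add]
  by_cases h : (spans.any (fun se => pvCov lines se k)) = true
  · rw [if_pos h]
    have : spans.countP (fun se => pvCov lines se k) ≠ 0 := by
      simp only [List.any_eq_true] at h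
      obtain ⟨se, hse, hcov⟩ := h
      have := List.countP_pos_iff (p := fun se => pvCov lines se k) (l := spans) |>.mpr ⟨se, hse, hcov⟩
      omega
    simp only [Option.getD_some]
    symm
    simp only [decide_eq_false_iff_not]
    intro hc
    exact this (by exact_mod_cast hc)
  · rw [if_neg h]
    have hcp : spans.countP (fun se => pvCov lines se k) = 0 := by
      rw [List.countP_eq_zero]
      intro se hse
      simp only [List.any_eq_true, not_exists] at h
      exact fun hcov => h se ⟨hse, hcov⟩
    rw [List.getElem?_replicate, if_pos hk]
    simp [hcp]
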